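-- pv_equiv track=rewrite | github.com/mikedotexe/reptends | bridge_reptends/orbit_weave.py | apply_carry
-- ===== SOURCE A (Python) =====
-- def apply_carry(raw_blocks: list[int], B: int) -> list[str]:
--     """
--     Apply carry propagation from right to left.
--
--     When raw_block[j] >= B, the overflow carries into block[j-1].
--     Returns list of m-digit block strings after carry stabilization.
--     """
--     m = len(str(B - 1))  # digit width
--     n = len(raw_blocks)
--
--     # Work with a copy, propagate carry from right to left
--     blocks = list(raw_blocks)
--
--     # Multiple passes until stable (carry can cascade)
--     changed = True
--     while changed:
--         changed = False
--         for j in range(n - 1, 0, -1):  # right to left, skip leftmost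
--             if blocks[j] >= B:
--                 carry = blocks[j] // B
--                 blocks[j] = blocks[j] % B
--                 blocks[j - 1] += carry
--                 changed = True
--
--     # Format as zero-padded strings
--     return [str(b).zfill(m) for b in blocks]
-- ===== SOURCE B (Python) =====
-- def apply_carry(raw_blocks: list[int], B: int) -> list[str]:
--     """Single right-to-left pass threading a scalar carry accumulator."""
--     m = len(str(B - 1))
--     out = []
--     carry = 0
--     for x in reversed(raw_blocks[1:]):
--         v = x + carry
--         if v >= B:
--             out.append(v % B)
--             carry = v // B
--         else:
--             out.append(v)
--             carry = 0
--     if raw_blocks: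
--         out.append(raw_blocks[0] + carry)
--     out.reverse()
--     return [str(b).zfill(m) for b in out]
-- ===== Notes on version B (the rewrite author's own statement) =====
-- stated objective: simpler
-- what changed: Replaces A's repeat-until-stable while-loop with in-array index-based carry propagation by a single right-to-left pass that threads a scalar carry accumulator and builds the result list back-to-front, with the leftover carry added to the head at the end.
import Mathlib
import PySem

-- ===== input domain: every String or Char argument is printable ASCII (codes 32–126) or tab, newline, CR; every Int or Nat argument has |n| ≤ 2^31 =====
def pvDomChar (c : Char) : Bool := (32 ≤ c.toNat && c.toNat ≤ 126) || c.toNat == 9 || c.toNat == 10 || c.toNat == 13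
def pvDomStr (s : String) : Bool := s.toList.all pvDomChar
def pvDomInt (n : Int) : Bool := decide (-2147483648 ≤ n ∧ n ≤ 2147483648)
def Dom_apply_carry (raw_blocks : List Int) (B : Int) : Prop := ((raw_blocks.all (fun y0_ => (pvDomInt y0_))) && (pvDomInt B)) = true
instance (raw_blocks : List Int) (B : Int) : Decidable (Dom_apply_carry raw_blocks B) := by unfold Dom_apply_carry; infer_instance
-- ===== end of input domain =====

-- B replaces A's repeat-until-stable passes over the array by one right-to-left pass
-- threading a scalar carry accumulator (objective: simpler).

-- ===== PORT A =====
-- one iteration of A's inner 'for j in range(n-1, 0, -1)' body; indices j and j-1 are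
-- always in range (1 ≤ j ≤ n-1), so pyGetD/pySetD are exact here
def pvStepA (B : Int) (st : List Int × Bool) (j : Int) : List Int × Bool :=
  let blocks := st.1
  let bj := PySem.List.pyGetD blocks j 0
  if bj ≥ B then
    let carry := PySem.Int.floordiv bj B
    let blocks1 := PySem.List.pySetD blocks j (PySem.Int.mod bj B)
    let blocks2 := PySem.List.pySetD blocks1 (j - 1) (PySem.List.pyGetD blocks1 (j - 1) 0 + carry)
    (blocks2, true)
  else st

-- one full pass of A's inner for-loop, returning (blocks, changed)
def pvPassA (B : Int) (n : Int) (blocks : List Int) : List Int × Bool :=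
  (PySem.List.pyRange (n - 1) 0 (-1)).foldl (pvStepA B) (blocks, false)

-- A's 'while changed' loop; the fuel only makes the recursion total: on Pre_ the Python
-- loop stabilizes after at most two passes (proved below), so fuel n+1 is never exhausted
def pvLoopA (B : Int) (n : Int) (fuel : Nat) (blocks : List Int) : List Int :=
  match fuel with
  | 0 => blocks
  | fuel + 1 =>
    let p := pvPassA B n blocks
    if p.2 then pvLoopA B n fuel p.1 else p.1

def apply_carry (raw_blocks : List Int) (B : Int) : List String :=
  let m := PySem.Str.len (PySem.Int.toStr (B - 1))
  let n : Int := PySem.List.len raw_blocks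
  let blocks := raw_blocks
  let final := pvLoopA B n (raw_blocks.length + 1) blocks
  final.map (fun b => PySem.Str.zfill (PySem.Int.toStr b) m)

-- ===== PORT B =====
-- body of B's 'for x in reversed(raw_blocks[1:])' loop: state (out, carry)
def pvStepB (B : Int) (st : List Int × Int) (x : Int) : List Int × Int :=
  let v := x + st.2
  if v ≥ B then (st.1 ++ [PySem.Int.mod v B], PySem.Int.floordiv v B)
  else (st.1 ++ [v], 0)

def apply_carry_alt (raw_blocks : List Int) (B : Int) : List String :=
  let m := PySem.Str.len (PySem.Int.toStr (B - 1))
  let p := ((PySem.List.slice raw_blocks (some 1) none).reverse).foldl (pvStepB B) ([], 0)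
  let out :=
    match raw_blocks with
    | [] => p.1.reverse
    | h :: _ => (p.1 ++ [h + p.2]).reverse
  out.map (fun b => PySem.Str.zfill (PySem.Int.toStr b) m)

-- ===== PRECONDITION & SPEC =====
-- Pre_ excludes exactly the inputs on which A does not return: for B = 0 a block ≥ 0 right
-- of position 0 raises ZeroDivisionError, and for B < 0 a block ≥ B right of position 0
-- makes the while-loop spin forever ('changed' stays True); A returns on everything else.
def Pre_apply_carry (raw_blocks : List Int) (B : Int) : Prop :=
  1 ≤ B ∨ ∀ x ∈ raw_blocks.drop 1, x < B
instance (raw_blocks : List Int) (B : Int) : Decidable (Pre_apply_carry raw_blocks B) := by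
  unfold Pre_apply_carry; infer_instance

def pvWitness_apply_carry : List Int × Int := ([12, 345, 99], 10)

def Spec_apply_carry (raw_blocks : List Int) (B : Int) (out : List String) : Prop := out = apply_carry_alt raw_blocks B
instance (raw_blocks : List Int) (B : Int) (out : List String) : Decidable (Spec_apply_carry raw_blocks B out) := by unfold Spec_apply_carry; infer_instance

-- ===== CLAIM (what is proved, stated in full; the proofs are below) =====
def Claim_equal_apply_carry : Prop := ∀ (raw_blocks : List Int) (B : Int), Dom_apply_carry raw_blocks B → Pre_apply_carry raw_blocks B → Spec_apply_carry raw_blocks B (apply_carry raw_blocks B)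

-- ===== LEMMAS AND PROOFS =====

-- ===== LEMMAS AND PROOFS =====

theorem pvStepA_fold_fst_flag (B : Int) (js : List Int) (l : List Int) (f₁ f₂ : Bool) :
    (js.foldl (pvStepA B) (l, f₁)).1 = (js.foldl (pvStepA B) (l, f₂)).1 := by
  induction js generalizing l f₁ f₂ with
  | nil => rfl
  | cons j js ih =>
    simp only [List.foldl_cons]
    by_cases hc : PySem.List.pyGetD l j 0 ≥ B
    · simp only [pvStepA, hc, if_pos]
    · simp only [pvStepA, hc, if_neg]
      exact ih _ _ _

theorem pvStepA_length (B : Int) (st : List Int × Bool) (j : Int) :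
    (pvStepA B st j).1.length = st.1.length := by
  by_cases hc : PySem.List.pyGetD st.1 j 0 ≥ B <;>
    simp [pvStepA, hc, PySem.List.length_pySetD]

theorem pvStepB_out_acc (B : Int) (l : List Int) : ∀ (o : List Int) (c : Int),
    l.foldl (pvStepB B) (o, c)
      = (o ++ (l.foldl (pvStepB B) ([], c)).1, (l.foldl (pvStepB B) ([], c)).2) := by
  induction l with
  | nil => intro o c; simp
  | cons x l ih =>
    intro o c
    by_cases hc : x + c ≥ B
    · simp only [List.foldl_cons, pvStepB, hc, if_pos, List.nil_append]
      rw [ih (o ++ [PySem.Int.mod (x + c) B]), ih [PySem.Int.mod (x + c) B]]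
      simp
    · simp only [List.foldl_cons, pvStepB, hc, if_neg, if_false, List.nil_append]
      rw [ih (o ++ [x + c]), ih [x + c]]
      simp

theorem pvStepB_length (B : Int) (l : List Int) : ∀ (o : List Int) (c : Int),
    (l.foldl (pvStepB B) (o, c)).1.length = o.length + l.length := by
  induction l with
  | nil => intro o c; simp
  | cons x l ih =>
    intro o c
    simp only [List.foldl_cons]
    by_cases hc : x + c ≥ B <;>
      simp only [List.foldl_cons, pvStepB, hc, if_pos, if_neg, if_false, List.nil_append] <;>
      rw [ih] <;> simp <;> omega

theorem pvStepB_elems (B : Int) (hB : 1 ≤ B) (l : List Int) : ∀ (o : List Int) (c : Int),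
    (∀ y ∈ o, y < B) → ∀ y ∈ (l.foldl (pvStepB B) (o, c)).1, y < B := by
  induction l with
  | nil => intro o c ho; simpa using ho
  | cons x l ih =>
    intro o c ho
    simp only [List.foldl_cons]
    by_cases hc : x + c ≥ B
    · simp only [pvStepB, hc, if_pos]
      refine ih _ _ ?_
      intro y hy
      rcases List.mem_append.1 hy with h | h
      · exact ho y h
      · simp at h; subst h; exact PySem.Int.mod_lt _ (by omega)
    · simp only [pvStepB, hc, if_neg]
      refine ih _ _ ?_
      intro y hy
      rcases List.mem_append.1 hy with h | h
      · exact ho y h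
      · simp at h; subst h; omega

theorem pvStepB_nochange (B : Int) (l : List Int) : ∀ (o : List Int),
    (∀ x ∈ l, x < B) → l.foldl (pvStepB B) (o, 0) = (o ++ l, 0) := by
  induction l with
  | nil => intro o _; simp
  | cons x l ih =>
    intro o h
    have hx : ¬ (x ≥ B) := by have := h x (by simp); omega
    simp only [List.foldl_cons, pvStepB, add_zero]
    rw [if_neg hx]
    rw [ih _ (fun y hy => h y (by simp [hy]))]
    simp
theorem pvStepA_append (B : Int) (l s : List Int) (f : Bool) (j : Int)
    (hj1 : 1 ≤ j) (hjl : j.toNat < l.length) :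
    pvStepA B (l ++ s, f) j = ((pvStepA B (l, f) j).1 ++ s, (pvStepA B (l, f) j).2) := by
  have h0 : (0:Int) ≤ j := by omega
  have hget : PySem.List.pyGetD (l ++ s) j 0 = PySem.List.pyGetD l j 0 := by
    rw [PySem.List.pyGetD_eq_getElem _ _ h0 (by simp; omega),
        PySem.List.pyGetD_eq_getElem _ _ h0 (by omega)]
    exact List.getElem_append_left hjl
  by_cases hc : PySem.List.pyGetD l j 0 ≥ B
  · have h01 : (0:Int) ≤ j - 1 := by omega
    have hj1l : (j - 1).toNat < l.length := by omega
    simp only [pvStepA, hget, hc, if_pos]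
    rw [PySem.List.pySetD_of_nonneg _ _ h0, PySem.List.pySetD_of_nonneg _ _ h0]
    rw [List.set_append, if_pos hjl]
    rw [PySem.List.pySetD_of_nonneg _ _ h01, PySem.List.pySetD_of_nonneg _ _ h01]
    rw [List.set_append, if_pos (by simpa using hj1l)]
    have hgs : PySem.List.pyGetD (l.set j.toNat (PySem.Int.mod (PySem.List.pyGetD l j 0) B) ++ s) (j - 1) 0
        = PySem.List.pyGetD (l.set j.toNat (PySem.Int.mod (PySem.List.pyGetD l j 0) B)) (j - 1) 0 := by
      rw [PySem.List.pyGetD_eq_getElem _ _ h01 (by simp; omega),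
          PySem.List.pyGetD_eq_getElem _ _ h01 (by simp; omega)]
      exact List.getElem_append_left (by simpa using hj1l)
    rw [hgs]
  · simp only [pvStepA, hget, hc, if_neg, if_false]

theorem pvStepA_frame (B : Int) (js : List Int) : ∀ (l s : List Int) (f : Bool),
    (∀ j ∈ js, 1 ≤ j ∧ j.toNat < l.length) →
    js.foldl (pvStepA B) (l ++ s, f)
      = ((js.foldl (pvStepA B) (l, f)).1 ++ s, (js.foldl (pvStepA B) (l, f)).2) := by
  induction js with
  | nil => intro l s f _; rfl
  | cons j js ih =>
    intro l s f h
    obtain ⟨hj1, hjl⟩ := h j (by simp)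
    simp only [List.foldl_cons, pvStepA_append B l s f j hj1 hjl]
    have hlen : (pvStepA B (l, f) j).1.length = l.length := pvStepA_length B (l, f) j
    have := ih (pvStepA B (l, f) j).1 s (pvStepA B (l, f) j).2
      (fun j' hj' => ⟨(h j' (by simp [hj'])).1, by rw [hlen]; exact (h j' (by simp [hj'])).2⟩)
    simpa using this

theorem pvStepA_stable (B : Int) (js : List Int) : ∀ (l : List Int) (f : Bool),
    (∀ j ∈ js, 1 ≤ j ∧ j.toNat < l.length ∧ l.getD j.toNat 0 < B) →
    js.foldl (pvStepA B) (l, f) = (l, f) := by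
  induction js with
  | nil => intro l f _; rfl
  | cons j js ih =>
    intro l f h
    obtain ⟨hj1, hjl, hlt⟩ := h j (by simp)
    have hget : PySem.List.pyGetD l j 0 = l.getD j.toNat 0 := by
      rw [PySem.List.pyGetD_eq_getElem _ _ (by omega) (by omega)]
      simp [List.getD, hjl]
    have hc : ¬ (PySem.List.pyGetD l j 0 ≥ B) := by rw [hget]; omega
    simp only [List.foldl_cons, pvStepA, hc, if_neg, if_false]
    exact ih l f (fun j' hj' => h j' (by simp [hj']))

theorem pvStepB_out_acc' (B : Int) (l : List Int) (st : List Int × Int) :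
    l.foldl (pvStepB B) st
      = (st.1 ++ (l.foldl (pvStepB B) ([], st.2)).1, (l.foldl (pvStepB B) ([], st.2)).2) := by
  rw [show st = (st.1, st.2) from rfl]
  exact pvStepB_out_acc B l st.1 st.2
theorem pvPassA_char (B : Int) : ∀ (N : Nat) (t : List Int) (hmm : Int), t.length = N →
    ((PySem.List.pyRange (t.length : Int) 0 (-1)).foldl (pvStepA B) (hmm :: t, false)).1
      = (hmm + (t.reverse.foldl (pvStepB B) ([], 0)).2)
          :: (t.reverse.foldl (pvStepB B) ([], 0)).1.reverse := by
  intro N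
  induction N with
  | zero =>
    intro t hh ht
    have : t = [] := List.length_eq_zero_iff.1 ht
    subst this
    simp [PySem.List.pyRange_neg_one_eq_nil (by omega : (0:Int) ≤ 0)]
  | succ N ih =>
    intro t hh ht
    rcases List.eq_nil_or_concat t with rfl | ⟨t', x, rfl⟩
    · simp at ht
    simp only [List.concat_eq_append] at ht ⊢
    have ht' : t'.length = N := by simp at ht; omega
    have hlen : (t' ++ [x]).length = t'.length + 1 := by simp
    set L : List Int := hh :: t' with hLdef
    have hL : L.length = (t' ++ [x]).length := by simp [hLdef, hlen]
    -- peel the first index n-1 = (t'++[x]).length off the countdown range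
    rw [PySem.List.pyRange_neg_one_cons (by simp : (0:Int) < ((t' ++ [x]).length : Int))]
    simp only [List.foldl_cons]
    rw [show hh :: (t' ++ [x]) = L ++ [x] by simp [hLdef]]
    -- the first step reads the LAST element x (index L.length) and, if it carries,
    -- writes x % B there and adds x // B to the element before it
    have hbj : PySem.List.pyGetD (L ++ [x]) ((t' ++ [x]).length : Int) 0 = x := by
      rw [← hL, PySem.List.pyGetD_natCast]
      simp [List.getD_eq_getElem?_getD]
    by_cases hc : x ≥ B
    · -- carry from the last element: x % B replaces it, x // B is added to the one before
      have hcc : PySem.List.pyGetD (L ++ [x]) (((t' ++ [x]).length : Int)) 0 ≥ B := by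
        rw [hbj]; omega
      simp only [pvStepA, hcc, if_pos, hbj]
      have hset1 : PySem.List.pySetD (L ++ [x]) (((t' ++ [x]).length : Int)) (PySem.Int.mod x B)
          = L ++ [PySem.Int.mod x B] := by
        rw [← hL, PySem.List.pySetD_natCast, List.set_append]
        simp
      rw [hset1]
      rw [show (((t' ++ [x]).length : Int)) - 1 = (t'.length : Int) by simp]
      rcases List.eq_nil_or_concat t' with rfl | ⟨t'', p, rfl⟩
      · -- the carry lands directly on the head
        simp only [hLdef]
        have hcx : (B ≤ x) := hc
        simp [PySem.List.pyRange_neg_one_eq_nil (le_refl (0:Int)), pvStepB, hcx,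
              PySem.List.pySetD_of_nonneg _ _ (by norm_num : (0:Int) ≤ 0)]
      · simp only [List.concat_eq_append] at ht' ⊢
        rw [if_pos hc]
        have hg2 : PySem.List.pyGetD (L ++ [PySem.Int.mod x B]) (((t'' ++ [p]).length : Int)) 0 = p := by
          rw [PySem.List.pyGetD_natCast]
          rw [show L ++ [PySem.Int.mod x B] = (hh :: t'') ++ ([p] ++ [PySem.Int.mod x B]) by simp [hLdef]]
          rw [List.getD_eq_getElem?_getD, List.getElem?_append_right (by simp)]
          simp
        have hs2 : PySem.List.pySetD (L ++ [PySem.Int.mod x B]) (((t'' ++ [p]).length : Int))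
              (p + PySem.Int.floordiv x B)
            = (hh :: (t'' ++ [p + PySem.Int.floordiv x B])) ++ [PySem.Int.mod x B] := by
          rw [PySem.List.pySetD_natCast, List.set_append, if_pos (by simp [hLdef])]
          congr 1
          simp [hLdef, List.set_append]
        rw [hg2, hs2]
        rw [pvStepA_frame B _ _ [PySem.Int.mod x B] true (by
          intro j hj
          rw [PySem.List.mem_pyRange_neg_one] at hj
          exact ⟨by omega, by simp at hj ⊢; omega⟩)]
        rw [pvStepA_fold_fst_flag B _ _ true false]
        rw [show (((t'' ++ [p]).length : Int))
              = (((t'' ++ [p + PySem.Int.floordiv x B]).length : Int)) by simp]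
        rw [ih (t'' ++ [p + PySem.Int.floordiv x B]) hh (by simp; simp at ht'; omega)]
        rw [show (t'' ++ [p + PySem.Int.floordiv x B]).reverse
              = (p + PySem.Int.floordiv x B) :: t''.reverse by simp]
        rw [show (t'' ++ [p] ++ [x]).reverse = x :: p :: t''.reverse by simp]
        simp only [List.foldl_cons]
        have hcx : B ≤ x := hc
        have h1 : pvStepB B ([], 0) x = ([PySem.Int.mod x B], PySem.Int.floordiv x B) := by
          simp [pvStepB, hcx]
        rw [h1]
        rw [pvStepB_out_acc' B t''.reverse
              (pvStepB B ([PySem.Int.mod x B], PySem.Int.floordiv x B) p),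
            pvStepB_out_acc' B t''.reverse
              (pvStepB B ([], 0) (p + PySem.Int.floordiv x B))]
        have hT1 : (pvStepB B ([PySem.Int.mod x B], PySem.Int.floordiv x B) p).1
            = [PySem.Int.mod x B] ++ (pvStepB B ([], 0) (p + PySem.Int.floordiv x B)).1 := by
          by_cases hpc : B ≤ p + PySem.Int.floordiv x B <;> simp [pvStepB, hpc]
        have hT2 : (pvStepB B ([PySem.Int.mod x B], PySem.Int.floordiv x B) p).2
            = (pvStepB B ([], 0) (p + PySem.Int.floordiv x B)).2 := by
          by_cases hpc : B ≤ p + PySem.Int.floordiv x B <;> simp [pvStepB, hpc]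
        rw [hT1, hT2]
        simp [List.reverse_append]
    · -- no carry from the last element: the step is the identity
      have hc' : ¬ (PySem.List.pyGetD (L ++ [x]) ((t' ++ [x]).length : Int) 0 ≥ B) := by
        rw [hbj]; omega
      simp only [pvStepA, hc', if_neg, if_false]
      rw [show (((t' ++ [x]).length : Int)) - 1 = (t'.length : Int) by simp]
      rw [pvStepA_frame B _ L [x] false (by
        intro j hj
        rw [PySem.List.mem_pyRange_neg_one] at hj
        refine ⟨by omega, ?_⟩
        simp only [hLdef, List.length_cons]
        omega)]
      simp only [hLdef]
      rw [ih t' hh ht']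
      rw [show (t' ++ [x]).reverse = x :: t'.reverse by simp]
      simp only [List.foldl_cons]
      have hcx : ¬ (B ≤ x) := hc
      have hstep : pvStepB B ([], 0) x = ([x], 0) := by
        simp [pvStepB, hcx]
      rw [hstep, pvStepB_out_acc B t'.reverse [x] 0]
      simp
theorem pvLoopA_one (B n : Int) (k : Nat) (blocks : List Int)
    (h : pvPassA B n blocks = (blocks, false)) : pvLoopA B n (k + 1) blocks = blocks := by
  unfold pvLoopA
  rw [h]
  simp

theorem pvLoopA_two (B n : Int) (k : Nat) (blocks L : List Int) (fl : Bool)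
    (h1 : pvPassA B n blocks = (L, fl)) (h2 : pvPassA B n L = (L, false)) :
    pvLoopA B n (k + 2) blocks = L := by
  unfold pvLoopA
  rw [h1]
  cases fl
  · simp
  · simp only [if_pos]
    exact pvLoopA_one B n k L h2

-- ===== VERDICT (by name: the statement is the Claim_ definition above) =====
theorem apply_carry_spec : Claim_equal_apply_carry := by
  unfold Claim_equal_apply_carry Spec_apply_carry
  intro raw B _ hpre
  unfold apply_carry apply_carry_alt
  cases raw with
  | nil => rfl
  | cons h t =>
    dsimp only
    have hslice : PySem.List.slice (h :: t) (some 1) none = t := by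
      rw [PySem.List.slice_from _ (by norm_num : (0:Int) ≤ 1)]
      rfl
    rw [hslice]
    have hn1 : PySem.List.len (h :: t) - 1 = (t.length : Int) := by
      simp [PySem.List.len_eq]
    have plen : (t.reverse.foldl (pvStepB B) ([], 0)).1.length = t.length := by
      rw [pvStepB_length]; simp
    have hfst : (pvPassA B (PySem.List.len (h :: t)) (h :: t)).1
        = (h + (t.reverse.foldl (pvStepB B) ([], 0)).2)
            :: (t.reverse.foldl (pvStepB B) ([], 0)).1.reverse := by
      unfold pvPassA
      rw [hn1]
      exact pvPassA_char B t.length t h rfl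
    have hfuel : (h :: t).length + 1 = t.length + 2 := by simp
    rw [hfuel]
    rcases hpre with hB | hB2
    · -- B ≥ 1: after one pass every block right of the head is < B, so the loop stops
      set L := (h + (t.reverse.foldl (pvStepB B) ([], 0)).2)
            :: (t.reverse.foldl (pvStepB B) ([], 0)).1.reverse with hLdef
      have helems : ∀ y ∈ (t.reverse.foldl (pvStepB B) ([], 0)).1, y < B :=
        pvStepB_elems B hB t.reverse [] 0 (by simp)
      have hstab : pvPassA B (PySem.List.len (h :: t)) L = (L, false) := by
        unfold pvPassA
        rw [hn1]
        refine pvStepA_stable B _ L false ?_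
        intro j hj
        rw [PySem.List.mem_pyRange_neg_one] at hj
        have hLlen : L.length = t.length + 1 := by
          rw [hLdef, List.length_cons, List.length_reverse, plen]
        refine ⟨by omega, by omega, ?_⟩
        obtain ⟨k, hk⟩ : ∃ k, j.toNat = k + 1 := ⟨j.toNat - 1, by omega⟩
        rw [hk, hLdef, List.getD_cons_succ]
        have hkl : k < (t.reverse.foldl (pvStepB B) ([], 0)).1.reverse.length := by
          rw [List.length_reverse, plen]; omega
        rw [List.getD_eq_getElem _ _ hkl]
        have : (t.reverse.foldl (pvStepB B) ([], 0)).1.reverse[k] ∈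
            (t.reverse.foldl (pvStepB B) ([], 0)).1 := by
          rw [← List.mem_reverse]
          exact List.getElem_mem hkl
        exact helems _ this
      rw [pvLoopA_two B _ t.length (h :: t) L (pvPassA B (PySem.List.len (h :: t)) (h :: t)).2
            (by rw [← hfst]) hstab]
      simp [hLdef]
    · -- every block right of the head is already < B: nothing carries on either side
      have hB2' : ∀ x ∈ t, x < B := by simpa using hB2
      have hstab0 : pvPassA B (PySem.List.len (h :: t)) (h :: t) = (h :: t, false) := by
        unfold pvPassA
        rw [hn1]
        refine pvStepA_stable B _ (h :: t) false ?_
        intro j hj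
        rw [PySem.List.mem_pyRange_neg_one] at hj
        refine ⟨by omega, by rw [List.length_cons]; omega, ?_⟩
        obtain ⟨k, hk⟩ : ∃ k, j.toNat = k + 1 := ⟨j.toNat - 1, by omega⟩
        rw [hk, List.getD_cons_succ]
        have hkl : k < t.length := by omega
        rw [List.getD_eq_getElem _ _ hkl]
        exact hB2' _ (List.getElem_mem hkl)
      rw [show t.length + 2 = (t.length + 1) + 1 from rfl]
      rw [pvLoopA_one B _ (t.length + 1) (h :: t) hstab0]
      rw [pvStepB_nochange B t.reverse [] (fun x hx => hB2' x (List.mem_reverse.1 hx))]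
      simp
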